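-- pv_equiv track=rewrite | github.com/hafzhang/ai_shezhen | extract_ppt_to_rag.py | extract_category_content
-- ===== SOURCE A (Python) =====
-- def extract_category_content(full_content, keywords):
--     """提取特定类别的内容"""
--     content_parts = []
--     current_part = []
--
--     lines = full_content.split('\n')
--
--     for line in lines:
--         line = line.strip()
--         if not line:
--             if current_part:
--                 content_parts.append(' '.join(current_part))
--                 current_part = []
--             continue
--
--         # 检查是否包含关键词
--         if any(kw.lower() in line.lower() for kw in keywords):
--             current_part.append(line)
--         else:
--             if current_part:
--                 content_parts.append(' '.join(current_part))
--                 current_part = []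
--
--     if current_part:
--         content_parts.append(' '.join(current_part))
--
--     # 合并相关内容
--     if content_parts:
--         combined_content = '\n'.join(content_parts)
--         # 清理格式
--         combined_content = combined_content.replace('  ', ' ').replace('  ', ' ')
--         return combined_content
--
--     return ""
-- ===== SOURCE B (Python) =====
-- def extract_category_content(full_content, keywords):
--     """提取特定类别的内容"""
--     lines = [l.strip() for l in full_content.split('\n')]
--
--     def keep(l):
--         return bool(l) and any(kw.lower() in l.lower() for kw in keywords)
--
--     content_parts = []
--     rest = lines
--     while rest:
--         head, rest = rest[0], rest[1:]
--         if keep(head):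
--             group = [head]
--             while rest and keep(rest[0]):
--                 group.append(rest[0])
--                 rest = rest[1:]
--             content_parts.append(' '.join(group))
--
--     if content_parts:
--         combined_content = '\n'.join(content_parts)
--         combined_content = combined_content.replace('  ', ' ').replace('  ', ' ')
--         return combined_content
--
--     return ""
-- ===== Notes on version B (the rewrite author's own statement) =====
-- stated objective: alternative
-- what changed: Replaces A's accumulator state machine (current_part buffer flushed on blanks/non-matches and again after the loop) with a span-based scan: strip all lines once, then advance two indices to slice out each maximal run of keyword-matching lines and join it directly, with no mutable buffer and no post-loop flush.
import Mathlib
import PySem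

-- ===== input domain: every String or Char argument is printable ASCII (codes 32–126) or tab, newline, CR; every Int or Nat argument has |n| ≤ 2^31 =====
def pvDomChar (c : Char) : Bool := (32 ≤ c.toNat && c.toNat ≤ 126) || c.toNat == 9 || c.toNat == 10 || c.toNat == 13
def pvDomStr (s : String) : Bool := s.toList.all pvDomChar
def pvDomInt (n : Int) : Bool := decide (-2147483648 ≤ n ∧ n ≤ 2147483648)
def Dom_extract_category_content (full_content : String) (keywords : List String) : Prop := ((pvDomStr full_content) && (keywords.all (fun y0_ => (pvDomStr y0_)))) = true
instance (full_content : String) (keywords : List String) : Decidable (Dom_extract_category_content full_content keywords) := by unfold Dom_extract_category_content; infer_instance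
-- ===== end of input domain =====

-- B replaces A's mutable current_part buffer (flushed on blanks, non-matches and after the loop)
-- with a span-based scan over the pre-stripped lines that slices out each maximal keyword run directly;
-- same cost, alternative decomposition.


-- any(kw.lower() in line.lower() for kw in keywords) — identical subexpression of both Pythons
def pvKw (keywords : List String) (l : String) : Bool :=
  keywords.any (fun kw => PySem.Str.isIn (PySem.Str.lower kw) (PySem.Str.lower l))

-- the identical tail of both Pythons: join with '\n', double replace, '' when empty
def pvFinish (content_parts : List String) : String :=
  if content_parts ≠ [] then
    PySem.Str.replace (PySem.Str.replace (PySem.Str.join "\n" content_parts) "  " " ") "  " " "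
  else ""

-- ===== PORT A =====
-- A's for-loop: state (content_parts, current_part), strip, flush on blank / non-match, final flush
def pvALoop (keywords : List String) : List String → List String → List String → List String
  | [], parts, cur => if cur ≠ [] then parts ++ [PySem.Str.join " " cur] else parts
  | l :: ls, parts, cur =>
      let line := PySem.Str.strip l
      if line = "" then
        if cur ≠ [] then pvALoop keywords ls (parts ++ [PySem.Str.join " " cur]) []
        else pvALoop keywords ls parts cur
      else if pvKw keywords line then
        pvALoop keywords ls parts (cur ++ [line])
      else
        if cur ≠ [] then pvALoop keywords ls (parts ++ [PySem.Str.join " " cur]) []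
        else pvALoop keywords ls parts cur

def extract_category_content (full_content : String) (keywords : List String) : String :=
  pvFinish (pvALoop keywords ((PySem.Str.split? full_content "\n").getD []) [] [])

-- ===== PORT B =====
-- keep(l) = bool(l) and any(...)
def pvKeep (keywords : List String) (l : String) : Bool :=
  (l != "") && pvKw keywords l

-- B's while-loop over the remaining suffix: each kept head starts a group that absorbs the
-- following kept lines (the inner while = takeWhile/dropWhile on the rest)
def pvBGroups (keywords : List String) : List String → List String
  | [] => []
  | head :: rest =>
      if pvKeep keywords head then
        PySem.Str.join " " (head :: rest.takeWhile (pvKeep keywords)) ::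
          pvBGroups keywords (rest.dropWhile (pvKeep keywords))
      else pvBGroups keywords rest
termination_by ls => ls.length
decreasing_by
  · exact Nat.lt_succ_of_le (List.length_dropWhile_le _ _)
  · exact Nat.lt_succ_of_le (Nat.le_refl _)

def extract_category_content_alt (full_content : String) (keywords : List String) : String :=
  pvFinish (pvBGroups keywords (((PySem.Str.split? full_content "\n").getD []).map PySem.Str.strip))

-- ===== PRECONDITION & SPEC =====
def Spec_extract_category_content (full_content : String) (keywords : List String) (out : String) : Prop := out = extract_category_content_alt full_content keywords
instance (full_content : String) (keywords : List String) (out : String) : Decidable (Spec_extract_category_content full_content keywords out) := by unfold Spec_extract_category_content; infer_instance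

-- ===== CLAIM (what is proved, stated in full; the proofs are below) =====
def Claim_equal_extract_category_content : Prop := ∀ (full_content : String) (keywords : List String), Dom_extract_category_content full_content keywords → Spec_extract_category_content full_content keywords (extract_category_content full_content keywords)

-- ===== LEMMAS AND PROOFS =====

lemma pvALoop_eq (keywords : List String) :
    ∀ (ls cur parts : List String),
      pvALoop keywords ls parts cur =
        parts ++
          (if cur = [] then pvBGroups keywords (ls.map PySem.Str.strip)
           else PySem.Str.join " " (cur ++ (ls.map PySem.Str.strip).takeWhile (pvKeep keywords)) ::
                pvBGroups keywords ((ls.map PySem.Str.strip).dropWhile (pvKeep keywords))) := by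
  intro ls
  induction ls with
  | nil =>
      intro cur parts
      by_cases h : cur = [] <;> simp [pvALoop, pvBGroups, h]
  | cons l ls ih =>
      intro cur parts
      by_cases hs : PySem.Str.strip l = ""
      · have hk : pvKeep keywords (PySem.Str.strip l) = false := by
          simp [pvKeep, hs]
        have hk0 : pvKeep keywords "" = false := by simp [pvKeep]
        by_cases h : cur = [] <;>
          simp [pvALoop, hs, h, ih, pvBGroups, hk0]
      · by_cases hkw : pvKw keywords (PySem.Str.strip l) = true
        · have hk : pvKeep keywords (PySem.Str.strip l) = true := by
            simp [pvKeep, hs, hkw]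
          by_cases h : cur = [] <;>
            simp [pvALoop, hs, hkw, h, ih, pvBGroups, hk]
        · have hk : pvKeep keywords (PySem.Str.strip l) = false := by
            simp [pvKeep, hkw]
          by_cases h : cur = [] <;>
            simp [pvALoop, hs, hkw, h, ih, pvBGroups, hk]

-- ===== VERDICT (by name: the statement is the Claim_ definition above) =====
theorem extract_category_content_spec : Claim_equal_extract_category_content := by
  intro full_content keywords _
  unfold Spec_extract_category_content extract_category_content extract_category_content_alt
  rw [pvALoop_eq]
  simp
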